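-- pv_equiv track=rewrite | github.com/Coni63/CG_repo | training/medium/next-car-license-plate.py | convert_reverse
-- ===== SOURCE A (Python) =====
-- def convert_reverse(num):
--     reste = '{:03d}'.format(num % 999)
--     num = num // 999
--     mot = ""
--     for i in range(4):
--         offset = num // (26**(3-i))
--         letter = offset + ord("A")
--         num -= offset * (26**(3-i))
--         mot += chr(letter)
--     return [mot[:2], reste, mot[2:]]
-- ===== SOURCE B (Python) =====
-- def convert_reverse(num):
--     reste = '{:03d}'.format(num % 999)
--     q = num // 999
--     d0 = q % 26; q //= 26
--     d1 = q % 26; q //= 26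
--     d2 = q % 26; q //= 26
--     A = ord('A')
--     return [chr(q + A) + chr(d2 + A), reste, chr(d1 + A) + chr(d0 + A)]
-- ===== Notes on version B (the rewrite author's own statement) =====
-- stated objective: simpler
-- what changed: B extracts the base-26 letters least-significant-first with three mod/floordiv steps (keeping the raw final quotient as the top letter) and builds the two letter pairs directly, instead of A's MSB-first loop over descending powers of 26 with repeated subtraction, string accumulation and slicing.
import Mathlib
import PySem

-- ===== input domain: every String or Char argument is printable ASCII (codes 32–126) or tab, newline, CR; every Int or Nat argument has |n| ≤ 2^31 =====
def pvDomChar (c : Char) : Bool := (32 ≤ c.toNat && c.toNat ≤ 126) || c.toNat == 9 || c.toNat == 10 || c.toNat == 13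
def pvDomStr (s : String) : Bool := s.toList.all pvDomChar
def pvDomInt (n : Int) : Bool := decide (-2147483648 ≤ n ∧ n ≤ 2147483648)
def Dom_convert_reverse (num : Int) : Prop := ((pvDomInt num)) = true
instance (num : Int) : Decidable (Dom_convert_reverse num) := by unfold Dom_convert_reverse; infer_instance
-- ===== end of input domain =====

-- B extracts the plate letters least-significant-first by repeated mod/floordiv instead of A's
-- MSB-first power-subtraction loop with string slicing; same values, simpler decomposition.


-- '{:03d}'.format(m): exact for 0 ≤ m < 1000 (both programs only format num % 999 ∈ [0, 998])
def pyFmt03 (m : Int) : String :=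
  let s := PySem.Int.toChars m
  String.ofList (List.replicate (3 - s.length) '0' ++ s)

-- chr(n): exact for 0 ≤ n (Pre_ excludes the inputs where Python's chr gets a negative code point)
def pyChr (n : Int) : Char := Char.ofNat n.toNat

-- ===== PORT A =====
def convert_reverse (num : Int) : List String :=
  let reste := pyFmt03 (PySem.Int.mod num 999)
  let num := PySem.Int.floordiv num 999
  let st := (List.range 4).foldl (fun (s : Int × List Char) i =>
      let offset := PySem.Int.floordiv s.1 (26 ^ (3 - i))
      let letter := offset + 65
      (s.1 - offset * (26 ^ (3 - i)), s.2 ++ [pyChr letter])) (num, [])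
  let mot := st.2
  [String.ofList (PySem.List.slice mot none (some 2)), reste,
   String.ofList (PySem.List.slice mot (some 2) none)]

-- ===== PORT B =====
def convert_reverse_alt (num : Int) : List String :=
  let reste := pyFmt03 (PySem.Int.mod num 999)
  let q0 := PySem.Int.floordiv num 999
  let d0 := PySem.Int.mod q0 26
  let q1 := PySem.Int.floordiv q0 26
  let d1 := PySem.Int.mod q1 26
  let q2 := PySem.Int.floordiv q1 26
  let d2 := PySem.Int.mod q2 26
  let q3 := PySem.Int.floordiv q2 26
  [String.ofList [pyChr (q3 + 65), pyChr (d2 + 65)], reste,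
   String.ofList [pyChr (d1 + 65), pyChr (d0 + 65)]]

-- ===== PRECONDITION & SPEC =====
-- Pre_ excludes exactly num < -1141297560, where the top letter's code num//999//17576 + 65 is
-- negative and Python's chr raises ValueError (in both A and B).
def Pre_convert_reverse (num : Int) : Prop := -1141297560 ≤ num
instance (num : Int) : Decidable (Pre_convert_reverse num) := by unfold Pre_convert_reverse; infer_instance
def pvWitness_convert_reverse : Int := (12345)

def Spec_convert_reverse (num : Int) (out : List String) : Prop := out = convert_reverse_alt num
instance (num : Int) (out : List String) : Decidable (Spec_convert_reverse num out) := by unfold Spec_convert_reverse; infer_instance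

-- ===== CLAIM (what is proved, stated in full; the proofs are below) =====
def Claim_equal_convert_reverse : Prop := ∀ (num : Int), Dom_convert_reverse num → Pre_convert_reverse num → Spec_convert_reverse num (convert_reverse num)

-- ===== LEMMAS AND PROOFS =====

-- ===== VERDICT (by name: the statement is the Claim_ definition above) =====
theorem convert_reverse_spec : Claim_equal_convert_reverse := by
  intro num _ _
  unfold Spec_convert_reverse convert_reverse convert_reverse_alt
  have hr : List.range 4 = [0, 1, 2, 3] := rfl
  rw [hr]
  simp only [List.foldl, pow_succ, pow_zero]
  norm_num [PySem.List.slice]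
  have e0 : num / 999 - num / 999 / 17576 * 17576 - (num / 999 - num / 999 / 17576 * 17576) / 676 * 676 -
      (num / 999 - num / 999 / 17576 * 17576 - (num / 999 - num / 999 / 17576 * 17576) / 676 * 676) / 26 * 26
      = num / 999 % 26 := by omega
  have e1 : (num / 999 - num / 999 / 17576 * 17576 - (num / 999 - num / 999 / 17576 * 17576) / 676 * 676) / 26
      = num / 999 / 26 % 26 := by omega
  have e2 : (num / 999 - num / 999 / 17576 * 17576) / 676 = num / 999 / 26 / 26 % 26 := by omega
  have e3 : num / 999 / 17576 = num / 999 / 26 / 26 / 26 := by omega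
  rw [e0, e1, e2, e3]
  exact ⟨rfl, rfl⟩
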